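-- pv_equiv track=rewrite | github.com/samaanjafari/infix-to-profix-using-stack | prec.py | HigherPrecedence
-- ===== SOURCE A (Python) =====
-- def HigherPrecedence(top, operator):
--     prec1 = ['(', ')']
--     prec2 = ['^']
--     prec3 = ['*', '/']
--     prec4 = ['+', '-']
--     precs = [prec1, prec2, prec3, prec4]
--
--     for i in range(len(precs)):
--         for j in range(len(precs)):
--             if top in precs[i] and operator in precs[j]:
--                 if i < j:
--                     return True
--                 elif i > j:
--                     return False
--                 else:
--                     return True  # If they have the same precedence, return True
-- ===== SOURCE B (Python) =====
-- def HigherPrecedence(top, operator):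
--     # position arithmetic on one encoding string: each precedence level
--     # occupies a two-char block of `order`, so level = find(c) // 2
--     order = "()^^*/+-"
--     if len(top) == 1 and len(operator) == 1:
--         t = order.find(top)
--         o = order.find(operator)
--         if t >= 0 and o >= 0:
--             return t // 2 <= o // 2
-- ===== Notes on version B (the rewrite author's own statement) =====
-- stated objective: simpler
-- what changed: Replaces the 4x4 nested group scan with position arithmetic on one encoding string: level = order.find(c) // 2 where each precedence level occupies a two-char block of "()^^*/+-", then a single <= comparison.
import Mathlib
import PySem

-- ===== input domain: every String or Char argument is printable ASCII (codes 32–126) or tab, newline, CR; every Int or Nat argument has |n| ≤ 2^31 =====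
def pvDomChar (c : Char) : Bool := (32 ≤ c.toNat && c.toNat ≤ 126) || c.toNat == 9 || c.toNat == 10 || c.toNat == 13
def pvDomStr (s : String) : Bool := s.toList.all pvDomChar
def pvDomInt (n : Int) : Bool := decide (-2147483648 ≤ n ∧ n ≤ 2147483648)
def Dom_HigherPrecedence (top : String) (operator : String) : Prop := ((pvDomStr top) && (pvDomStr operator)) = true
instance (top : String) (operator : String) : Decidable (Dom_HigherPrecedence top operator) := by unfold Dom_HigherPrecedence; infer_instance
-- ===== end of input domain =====

-- B replaces A's 4x4 nested scan over precedence groups by position arithmetic on one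
-- encoding string ("()^^*/+-": each level is a two-char block, level = find // 2); simpler,
-- same return value everywhere, incl. None fall-through.

-- ===== PORT A =====
-- inner 'for j in range(len(precs))' loop with early return
def pvInnerA (top operator : String) (precs : List (List String)) (i : Nat) : List Nat → Option Bool
  | [] => none
  | j :: js =>
    if (precs.getD i []).contains top && (precs.getD j []).contains operator then
      if i < j then some true
      else if i > j then some false
      else some true
    else pvInnerA top operator precs i js

-- outer 'for i in range(len(precs))' loop
def pvOuterA (top operator : String) (precs : List (List String)) : List Nat → Option Bool
  | [] => none
  | i :: is =>
    match pvInnerA top operator precs i (List.range precs.length) with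
    | some b => some b
    | none => pvOuterA top operator precs is

def HigherPrecedence (top : String) (operator : String) : Option Bool :=
  let prec1 := ["(", ")"]
  let prec2 := ["^"]
  let prec3 := ["*", "/"]
  let prec4 := ["+", "-"]
  let precs := [prec1, prec2, prec3, prec4]
  pvOuterA top operator precs (List.range precs.length)

-- ===== PORT B =====
def HigherPrecedence_alt (top : String) (operator : String) : Option Bool :=
  let order := "()^^*/+-"
  if PySem.Str.len top == 1 && PySem.Str.len operator == 1 then
    let t := PySem.Str.find order top
    let o := PySem.Str.find order operator
    if 0 ≤ t && 0 ≤ o then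
      some (decide (PySem.Int.floordiv t 2 ≤ PySem.Int.floordiv o 2))
    else none
  else none

-- ===== PRECONDITION & SPEC =====
def Spec_HigherPrecedence (top : String) (operator : String) (out : Option Bool) : Prop := out = HigherPrecedence_alt top operator
instance (top : String) (operator : String) (out : Option Bool) : Decidable (Spec_HigherPrecedence top operator out) := by unfold Spec_HigherPrecedence; infer_instance

-- ===== CLAIM (what is proved, stated in full; the proofs are below) =====
def Claim_equal_HigherPrecedence : Prop := ∀ (top : String) (operator : String), Dom_HigherPrecedence top operator → Spec_HigherPrecedence top operator (HigherPrecedence top operator)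

-- ===== LEMMAS AND PROOFS =====

-- any string is one of the seven operator literals, or none of them
theorem pvStrCases (s : String) :
    s = "(" ∨ s = ")" ∨ s = "^" ∨ s = "*" ∨ s = "/" ∨ s = "+" ∨ s = "-" ∨
    (s ≠ "(" ∧ s ≠ ")" ∧ s ≠ "^" ∧ s ≠ "*" ∧ s ≠ "/" ∧ s ≠ "+" ∧ s ≠ "-") := by
  tauto

-- A returns none when top is in no precedence group
theorem pvA_none_left (top operator : String)
    (h : top ≠ "(" ∧ top ≠ ")" ∧ top ≠ "^" ∧ top ≠ "*" ∧ top ≠ "/" ∧ top ≠ "+" ∧ top ≠ "-") :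
    HigherPrecedence top operator = none := by
  obtain ⟨h1, h2, h3, h4, h5, h6, h7⟩ := h
  simp [HigherPrecedence, pvOuterA, pvInnerA, List.range_succ, h1, h2, h3, h4, h5, h6, h7]

-- A returns none when operator is in no precedence group
theorem pvA_none_right (top operator : String)
    (h : operator ≠ "(" ∧ operator ≠ ")" ∧ operator ≠ "^" ∧ operator ≠ "*" ∧ operator ≠ "/" ∧
         operator ≠ "+" ∧ operator ≠ "-") :
    HigherPrecedence top operator = none := by
  obtain ⟨h1, h2, h3, h4, h5, h6, h7⟩ := h
  simp [HigherPrecedence, pvOuterA, pvInnerA, List.range_succ, h1, h2, h3, h4, h5, h6, h7]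

-- a one-char string that is none of the seven literals is not found in the order string
theorem pvFind_neg (s : String) (c : Char) (hc : s.toList = [c])
    (h : s ≠ "(" ∧ s ≠ ")" ∧ s ≠ "^" ∧ s ≠ "*" ∧ s ≠ "/" ∧ s ≠ "+" ∧ s ≠ "-") :
    PySem.Str.find "()^^*/+-" s = -1 := by
  rw [PySem.Str.find_eq_neg_one_iff]
  intro hinf
  have hm : c ∈ (['(', ')', '^', '^', '*', '/', '+', '-'] : List Char) := by
    have hl : "()^^*/+-".toList = ['(', ')', '^', '^', '*', '/', '+', '-'] := by decide
    exact hl ▸ hinf.mem (by simp [hc])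
  obtain ⟨h1, h2, h3, h4, h5, h6, h7⟩ := h
  simp only [List.mem_cons, List.not_mem_nil, or_false] at hm
  rcases hm with rfl|rfl|rfl|rfl|rfl|rfl|rfl|rfl <;>
    first
    | exact h1 (String.toList_injective (hc.trans (by decide)))
    | exact h2 (String.toList_injective (hc.trans (by decide)))
    | exact h3 (String.toList_injective (hc.trans (by decide)))
    | exact h4 (String.toList_injective (hc.trans (by decide)))
    | exact h5 (String.toList_injective (hc.trans (by decide)))
    | exact h6 (String.toList_injective (hc.trans (by decide)))
    | exact h7 (String.toList_injective (hc.trans (by decide)))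

-- B returns none when top is in no precedence group
theorem pvB_none_left (top operator : String)
    (h : top ≠ "(" ∧ top ≠ ")" ∧ top ≠ "^" ∧ top ≠ "*" ∧ top ≠ "/" ∧ top ≠ "+" ∧ top ≠ "-") :
    HigherPrecedence_alt top operator = none := by
  rcases hl : top.toList with _ | ⟨c, _ | ⟨d, rest⟩⟩
  · simp [HigherPrecedence_alt, PySem.Str.len_eq, hl]
  · have hf := pvFind_neg top c hl h
    simp only [PySem.Str.find_eq, hl,
      show "()^^*/+-".toList = ['(', ')', '^', '^', '*', '/', '+', '-'] from by decide] at hf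
    simp [HigherPrecedence_alt, PySem.Str.len_eq, PySem.Str.find_eq, hl, hf]
  · simp [HigherPrecedence_alt, PySem.Str.len_eq, hl]
    exact fun hx => absurd hx (by omega)

-- B returns none when operator is in no precedence group
theorem pvB_none_right (top operator : String)
    (h : operator ≠ "(" ∧ operator ≠ ")" ∧ operator ≠ "^" ∧ operator ≠ "*" ∧ operator ≠ "/" ∧
         operator ≠ "+" ∧ operator ≠ "-") :
    HigherPrecedence_alt top operator = none := by
  rcases hl : operator.toList with _ | ⟨c, _ | ⟨d, rest⟩⟩
  · simp [HigherPrecedence_alt, PySem.Str.len_eq, hl]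
  · have hf := pvFind_neg operator c hl h
    simp only [PySem.Str.find_eq, hl,
      show "()^^*/+-".toList = ['(', ')', '^', '^', '*', '/', '+', '-'] from by decide] at hf
    simp [HigherPrecedence_alt, PySem.Str.len_eq, PySem.Str.find_eq, hl, hf]
  · simp [HigherPrecedence_alt, PySem.Str.len_eq, hl]
    exact fun _ hx => absurd hx (by omega)

-- ===== VERDICT (by name: the statement is the Claim_ definition above) =====
theorem HigherPrecedence_spec : Claim_equal_HigherPrecedence := by
  intro top operator _
  unfold Spec_HigherPrecedence
  rcases pvStrCases top with h|h|h|h|h|h|h|h <;>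
    [skip; skip; skip; skip; skip; skip; skip;
     exact (pvA_none_left top operator h).trans (pvB_none_left top operator h).symm] <;>
  subst h <;>
  (rcases pvStrCases operator with g|g|g|g|g|g|g|g <;>
    [skip; skip; skip; skip; skip; skip; skip;
     exact (pvA_none_right _ operator g).trans (pvB_none_right _ operator g).symm] <;>
   subst g <;> decide)
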